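-- pv_equiv track=rewrite | github.com/Hayeong1224/Algorithm | 프로그래머스/4/17685. ［3차］ 자동완성/［3차］ 자동완성.py | solution
-- ===== SOURCE A (Python) =====
-- def solution(words):
--     words.sort()
--     result = []
--
--     for i in range(len(words)):
--         cnt1, cnt2 = 0, 0
--
--         if i-1 >= 0: # 앞 비교
--             for j in range(len(words[i-1])):
--                 if words[i][j] != words[i-1][j]:
--                     break
--                 cnt1 += 1
--
--         if i+1 < len(words): # 뒤 비교
--             for j in range(len(words[i])):
--                 if words[i][j] != words[i+1][j]:
--                     break
--                 cnt2 += 1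
--
--         cnt = max(cnt1, cnt2)
--
--         if cnt == len(words[i]):
--             result.append(cnt)
--         else:
--             result.append(cnt + 1)
--
--     return sum(result)
-- ===== SOURCE B (Python) =====
-- def solution(words):
--     # Count typed characters via a prefix-frequency table instead of sorting and
--     # comparing neighbours.  (Return-value equivalence only: A sorts `words` in
--     # place; B leaves the argument untouched.)
--     prefixes = [w[:d] for w in words for d in range(1, len(w) + 1)]
--     cnt = {}
--     for p in prefixes:
--         cnt[p] = cnt.get(p, 0) + 1
--     total = 0
--     for w in words:
--         typed = len(w)
--         for d in range(1, len(w) + 1):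
--             if cnt[w[:d]] == 1:
--                 typed = d
--                 break
--         total += typed
--     return total
-- ===== Notes on version B (the rewrite author's own statement) =====
-- stated objective: alternative
-- what changed: Instead of sorting the list and char-comparing each word with both sorted neighbours, B builds a frequency table of all word prefixes once and, per word, charges the first depth whose prefix is unique (falling back to the full length); the argument list is no longer mutated by a sort.
import Mathlib
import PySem

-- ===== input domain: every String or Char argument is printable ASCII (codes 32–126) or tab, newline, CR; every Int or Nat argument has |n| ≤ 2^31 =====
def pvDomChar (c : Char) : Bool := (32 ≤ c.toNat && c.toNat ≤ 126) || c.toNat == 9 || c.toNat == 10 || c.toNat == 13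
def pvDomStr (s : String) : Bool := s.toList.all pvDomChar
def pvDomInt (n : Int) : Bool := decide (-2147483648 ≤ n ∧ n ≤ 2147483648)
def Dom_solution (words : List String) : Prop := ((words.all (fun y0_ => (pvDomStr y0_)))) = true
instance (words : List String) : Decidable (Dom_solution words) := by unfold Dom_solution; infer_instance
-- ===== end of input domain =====

-- B replaces A's sort-and-compare-neighbours scan by a prefix-frequency table
-- (alternative algorithm; return-value equivalence only: A sorts its argument in
-- place, B leaves it untouched).


-- ===== PORT A =====
-- A's inner `for j in range(…): if …[j] != …[j]: break; cnt += 1` loop: counts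
-- matching leading characters.  A missing index (where Python would raise
-- IndexError — unreachable, the list has just been sorted) ends the loop like a
-- mismatch.
def lcpA : List Char → List Char → Nat
  | a :: x, b :: y => if a = b then lcpA x y + 1 else 0
  | _, _ => 0

def solution (words : List String) : Int :=
  let sw := PySem.List.sorted words (fun x => x) false   -- words.sort()
  let n : Int := (sw.length : Int)
  let result : List Int :=
    (PySem.List.pyRange 0 n).foldl (fun res i =>
      let wi := (PySem.List.pyGetD sw i "").toList
      let cnt1 : Nat := if 0 ≤ i - 1 then lcpA wi (PySem.List.pyGetD sw (i - 1) "").toList else 0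
      let cnt2 : Nat := if i + 1 < n then lcpA wi (PySem.List.pyGetD sw (i + 1) "").toList else 0
      let cnt := max cnt1 cnt2
      res ++ [if cnt = wi.length then (cnt : Int) else (cnt : Int) + 1]) []
  result.sum

-- ===== PORT B =====
-- B's `for d in range(1, len(w)+1): … break` lookup loop; `cnt[w[:d]]` always hits
-- an existing key (w itself put it there), so `getD _ 0` only marks the dead KeyError.
def typedLoop (cnt : PySem.Dict String Int) (w : String) (d : Nat) : Int :=
  if d ≤ w.toList.length then
    if cnt.getD (PySem.Str.slice w none (some (d : Int))) 0 = 1 then (d : Int)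
    else typedLoop cnt w (d + 1)
  else (w.toList.length : Int)
termination_by w.toList.length + 1 - d
decreasing_by simp only [String.length_toList] at *; omega

def solution_alt (words : List String) : Int :=
  let prefixes : List String :=
    words.flatMap (fun w =>
      (PySem.List.pyRange 1 ((w.toList.length : Int) + 1)).map
        (fun d => PySem.Str.slice w none (some d)))
  let cnt : PySem.Dict String Int :=
    prefixes.foldl (fun d p => d.insert p (d.getD p 0 + 1)) PySem.Dict.empty
  words.foldl (fun tot w => tot + typedLoop cnt w 1) 0

-- ===== PRECONDITION & SPEC =====
def Spec_solution (words : List String) (out : Int) : Prop := out = solution_alt words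
instance (words : List String) (out : Int) : Decidable (Spec_solution words out) := by unfold Spec_solution; infer_instance

-- ===== CLAIM (what is proved, stated in full; the proofs are below) =====
def Claim_equal_solution : Prop := ∀ (words : List String), Dom_solution words → Spec_solution words (solution words)

-- ===== LEMMAS AND PROOFS =====

-- the most characters `w` shares with any element of `l`
def maxLcp (w : List Char) (l : List String) : Nat :=
  (l.map (fun v => lcpA w v.toList)).foldr max 0

-- the number of characters typed for `w` when the word list is `ws`
def charge (w : String) (ws : List String) : Int :=
  ((min w.toList.length (maxLcp w.toList (ws.erase w) + 1) : Nat) : Int)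

theorem lcpA_comm (x y : List Char) : lcpA x y = lcpA y x := by
  induction x generalizing y with
  | nil => cases y <;> simp [lcpA]
  | cons a x ih =>
    cases y with
    | nil => simp [lcpA]
    | cons b y =>
      simp only [lcpA]
      by_cases h : a = b
      · subst h; simp [ih]
      · simp [h, Ne.symm h]

theorem lcpA_le_left (x y : List Char) : lcpA x y ≤ x.length := by
  induction x generalizing y with
  | nil => cases y <;> simp [lcpA]
  | cons a x ih =>
    cases y with
    | nil => simp [lcpA]
    | cons b y =>
      simp only [lcpA, List.length_cons]
      split
      · exact Nat.succ_le_succ (ih y)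
      · omega

theorem take_prefix_iff_lcpA (x y : List Char) (e : Nat) (he : e ≤ x.length) :
    x.take e <+: y ↔ e ≤ lcpA x y := by
  induction x generalizing y e with
  | nil => simp at he; subst he; simp
  | cons a x ih =>
    cases e with
    | zero => simp
    | succ e =>
      cases y with
      | nil => simp [lcpA, List.take_succ_cons]
      | cons b y =>
        simp only [List.take_succ_cons, lcpA]
        by_cases h : a = b
        · subst h
          rw [List.cons_prefix_cons]
          simp [ih y e (by simpa using he)]
        · simp [List.cons_prefix_cons, h]

-- the key order fact: between two sorted neighbours of `a` nothing matches better
theorem lex_lcpA (a b c : List Char)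
    (hab : List.Lex (· < ·) a b ∨ a = b) (hbc : List.Lex (· < ·) b c ∨ b = c) :
    lcpA a c ≤ lcpA a b ∧ lcpA a c ≤ lcpA b c := by
  induction a generalizing b c with
  | nil => cases c <;> simp [lcpA]
  | cons x a ih =>
    cases c with
    | nil => simp [lcpA]
    | cons z c =>
      by_cases hxz : x = z
      · subst hxz
        cases b with
        | nil =>
          rcases hab with hab | hab
          · cases hab
          · exact absurd hab (by simp)
        | cons y b' =>
          have hxy : x < y ∨ (x = y ∧ (List.Lex (· < ·) a b' ∨ a = b')) := by
            rcases hab with hab | hab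
            · cases hab with
              | rel h => exact Or.inl h
              | cons h => exact Or.inr ⟨rfl, Or.inl h⟩
            · injection hab with h1 h2; exact Or.inr ⟨h1, Or.inr h2⟩
          have hyx : y < x ∨ (y = x ∧ (List.Lex (· < ·) b' c ∨ b' = c)) := by
            rcases hbc with hbc | hbc
            · cases hbc with
              | rel h => exact Or.inl h
              | cons h => exact Or.inr ⟨rfl, Or.inl h⟩
            · injection hbc with h1 h2; exact Or.inr ⟨h1, Or.inr h2⟩
          rcases hxy with h1 | ⟨rfl, hab'⟩
          · rcases hyx with h2 | ⟨rfl, _⟩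
            · exact absurd (lt_trans h1 h2) (lt_irrefl x)
            · exact absurd h1 (lt_irrefl _)
          · have hbc' : List.Lex (· < ·) b' c ∨ b' = c := by
              rcases hyx with h2 | ⟨_, hbc'⟩
              · exact absurd h2 (lt_irrefl _)
              · exact hbc'
            have := ih b' c hab' hbc'
            simp [lcpA]
            omega
      · simp [lcpA, hxz]

theorem maxLcp_cons (w : List Char) (v : String) (l : List String) :
    maxLcp w (v :: l) = max (lcpA w v.toList) (maxLcp w l) := rfl

theorem maxLcp_append (w : List Char) (l₁ l₂ : List String) :
    maxLcp w (l₁ ++ l₂) = max (maxLcp w l₁) (maxLcp w l₂) := by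
  induction l₁ with
  | nil => simp [maxLcp]
  | cons v l ih => simp only [List.cons_append, maxLcp_cons, ih]; omega

theorem le_maxLcp (w : List Char) {v : String} {l : List String} (h : v ∈ l) :
    lcpA w v.toList ≤ maxLcp w l := by
  induction l with
  | nil => cases h
  | cons u l ih =>
    rcases List.mem_cons.mp h with rfl | h
    · simp [maxLcp_cons]
    · have := ih h; simp only [maxLcp_cons]; omega

theorem maxLcp_le (w : List Char) {l : List String} {K : Nat}
    (h : ∀ v ∈ l, lcpA w v.toList ≤ K) : maxLcp w l ≤ K := by
  induction l with
  | nil => simp [maxLcp]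
  | cons u l ih =>
    have h1 := h u (List.mem_cons_self)
    have h2 := ih (fun v hv => h v (List.mem_cons_of_mem _ hv))
    simp only [maxLcp_cons]; omega

theorem maxLcp_lt_iff (w : List Char) (l : List String) (e : Nat) (he : 1 ≤ e) :
    maxLcp w l < e ↔ ∀ v ∈ l, lcpA w v.toList < e := by
  constructor
  · exact fun h v hv => Nat.lt_of_le_of_lt (le_maxLcp w hv) h
  · intro h
    obtain ⟨e, rfl⟩ := Nat.exists_eq_add_of_le he
    have : maxLcp w l ≤ e := maxLcp_le w (fun v hv => by have := h v hv; omega)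
    omega

theorem maxLcp_perm (w : List Char) {l l' : List String} (h : l.Perm l') :
    maxLcp w l = maxLcp w l' :=
  List.Perm.foldr_eq (lcomm := ⟨fun a b c => by omega⟩) (h.map _) 0

theorem charge_perm (w : String) {l l' : List String} (h : l.Perm l') :
    charge w l = charge w l' := by
  unfold charge
  rw [maxLcp_perm w.toList (h.erase w)]

-- string order transfers to lexicographic order on the character lists
theorem le_toList {s t : String} (h : s ≤ t) :
    List.Lex (· < ·) s.toList t.toList ∨ s.toList = t.toList := by
  rcases lt_or_eq_of_le h with h | h
  · exact Or.inl (List.lex_lt.mpr (String.lt_iff_toList_lt.mp h))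
  · exact Or.inr (by rw [h])

-- the neighbour lemma: in a sorted list the best match of s[i] is a neighbour
theorem maxLcp_eraseIdx_sorted (s : List String)
    (hs : List.Pairwise (· ≤ ·) s) (i : Nat) (hi : i < s.length) :
    maxLcp s[i].toList (s.eraseIdx i) =
      max (if h : 1 ≤ i then lcpA s[i].toList (s[i-1]'(by omega)).toList else 0)
          (if h : i + 1 < s.length then lcpA s[i].toList (s[i+1]'h).toList else 0) := by
  have hmono : ∀ (p q : Nat) (hp : p < s.length) (hq : q < s.length), p ≤ q →
      (List.Lex (· < ·) (s[p]'hp).toList (s[q]'hq).toList ∨ (s[p]'hp).toList = (s[q]'hq).toList) := by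
    intro p q hp hq hpq
    rcases Nat.lt_or_eq_of_le hpq with h | h
    · exact le_toList (List.pairwise_iff_getElem.mp hs p q hp hq h)
    · subst h; exact Or.inr rfl
  rw [List.eraseIdx_eq_take_drop_succ, maxLcp_append]
  have htake : maxLcp s[i].toList (s.take i) =
      (if h : 1 ≤ i then lcpA s[i].toList (s[i-1]'(by omega)).toList else 0) := by
    split
    · rename_i h1
      apply Nat.le_antisymm
      · apply maxLcp_le
        intro v hv
        obtain ⟨j, hj, hvj⟩ := List.mem_iff_getElem.mp hv
        have hj' : j < i := by simp at hj; omega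
        have hji : j < s.length := by omega
        have hveq : v = s[j]'hji := by rw [← hvj]; exact List.getElem_take
        subst hveq
        have h1' := hmono j (i-1) hji (by omega) (by omega)
        have h2' := hmono (i-1) i (by omega) hi (by omega)
        have := (lex_lcpA (s[j]'hji).toList (s[i-1]'(by omega)).toList s[i].toList h1' h2').2
        calc lcpA s[i].toList (s[j]'hji).toList
            = lcpA (s[j]'hji).toList s[i].toList := lcpA_comm _ _
          _ ≤ lcpA (s[i-1]'(by omega)).toList s[i].toList := this
          _ = lcpA s[i].toList (s[i-1]'(by omega)).toList := lcpA_comm _ _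
      · apply le_maxLcp
        apply List.mem_iff_getElem.mpr
        exact ⟨i-1, by simp; omega, List.getElem_take⟩
    · rename_i h1
      have : i = 0 := by omega
      subst this
      simp [maxLcp]
  have hdrop : maxLcp s[i].toList (s.drop (i+1)) =
      (if h : i + 1 < s.length then lcpA s[i].toList (s[i+1]'h).toList else 0) := by
    split
    · rename_i h1
      apply Nat.le_antisymm
      · apply maxLcp_le
        intro v hv
        obtain ⟨j, hj, hvj⟩ := List.mem_iff_getElem.mp hv
        have hji : i + 1 + j < s.length := by simp at hj; omega
        have hveq : v = s[i+1+j]'hji := by rw [← hvj]; exact List.getElem_drop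
        subst hveq
        have h1' := hmono i (i+1) hi h1 (by omega)
        have h2' := hmono (i+1) (i+1+j) h1 hji (by omega)
        exact (lex_lcpA s[i].toList (s[i+1]'h1).toList (s[i+1+j]'hji).toList h1' h2').1
      · apply le_maxLcp
        apply List.mem_iff_getElem.mpr
        refine ⟨0, by simp; omega, ?_⟩
        have : (s.drop (i+1))[0]'(by simp; omega) = s[i+1+0]'(by omega) := List.getElem_drop
        simp only [Nat.add_zero] at this; exact this
    · rename_i h1
      have : s.drop (i+1) = [] := by
        apply List.drop_eq_nil_of_le; omega
      rw [this]; rfl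
  rw [htake, hdrop]

theorem erase_perm_eraseIdx (s : List String) (i : Nat) (hi : i < s.length) :
    (s.erase s[i]).Perm (s.eraseIdx i) := by
  have h1 : s.Perm (s[i] :: s.eraseIdx i) := (List.getElem_cons_eraseIdx_perm hi).symm
  have h2 : s.Perm (s[i] :: s.erase s[i]) := List.perm_cons_erase (List.getElem_mem hi)
  exact List.Perm.cons_inv (h2.symm.trans h1)

-- ---- B-side characterisation ----

theorem toList_pfx (w : String) (e : Nat) :
    (PySem.Str.slice w none (some (e : Int))).toList = w.toList.take e := by
  rw [PySem.Str.toList_slice, PySem.Chars.slice_eq_listSlice,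
    PySem.List.slice_to _ (by omega : (0:Int) ≤ (e:Int))]
  simp

theorem pyRange_one_eq (n : Nat) :
    PySem.List.pyRange 1 ((n:Int)+1) = (List.range n).map (fun k : Nat => ((k:Int)+1)) := by
  induction n with
  | zero => rfl
  | succ n ih =>
    have : ((n:Int)+1)+1 = (((n+1):Nat):Int)+1 := by push_cast; ring
    rw [List.range_succ, ← this, PySem.List.pyRange_one_succ_right (by omega)]
    simp [ih]

theorem count_prefList (p v : String) (hp : p.toList ≠ []) :
    ((List.range v.toList.length).map
      (fun k : Nat => PySem.Str.slice v none (some ((k:Int)+1)))).count p =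
      if p.toList <+: v.toList then 1 else 0 := by
  have htl : ∀ k : Nat, (PySem.Str.slice v none (some ((k:Int)+1))).toList = v.toList.take (k+1) := by
    intro k
    have : ((k:Int)+1) = (((k+1):Nat):Int) := by push_cast; ring
    rw [this]; exact toList_pfx v (k+1)
  have hmem : p ∈ (List.range v.toList.length).map
      (fun k : Nat => PySem.Str.slice v none (some ((k:Int)+1))) ↔ p.toList <+: v.toList := by
    simp only [List.mem_map, List.mem_range]
    constructor
    · rintro ⟨k, hk, rfl⟩
      have h2 : (PySem.Str.slice v none (some ((k:Int)+1))).toList <+: v.toList := by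
        rw [htl k]; exact List.take_prefix _ _
      exact h2
    · intro hpre
      have hlen : p.toList.length ≤ v.toList.length := hpre.length_le
      have hpos : 1 ≤ p.toList.length := by
        cases hz : p.toList with
        | nil => exact absurd hz hp
        | cons a l => simp
      refine ⟨p.toList.length - 1, by omega, ?_⟩
      apply String.toList_inj.mp
      rw [htl]
      have h1 : p.toList.length - 1 + 1 = p.toList.length := by omega
      rw [h1]
      exact (List.prefix_iff_eq_take.mp hpre).symm
  by_cases hpre : p.toList <+: v.toList
  · rw [if_pos hpre]
    apply List.count_eq_one_of_mem
    · apply (List.nodup_map_iff_inj_on List.nodup_range).mpr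
      intro x hx y hy hxy
      have := congrArg (fun s => s.toList.length) hxy
      simp only [htl, List.length_take] at this
      simp only [List.mem_range] at hx hy
      omega
    · exact hmem.mpr hpre
  · rw [if_neg hpre]
    exact List.count_eq_zero.mpr (fun h => hpre (hmem.mp h))

theorem sum_map_ite_one_zero_nat {α : Type} (l : List α) (q : α → Bool) :
    (l.map (fun v => if q v then (1:Nat) else 0)).sum = l.countP q := by
  induction l with
  | nil => rfl
  | cons a l ih =>
    simp only [List.map_cons, List.sum_cons, List.countP_cons, ih]
    by_cases h : q a <;> simp [h]
    omega

theorem countP_prefix_eq_one_iff (ws : List String) (w : String) (hw : w ∈ ws)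
    (e : Nat) (he1 : 1 ≤ e) (he2 : e ≤ w.toList.length) :
    (ws.countP (fun v => decide (w.toList.take e <+: v.toList)) = 1) ↔
      maxLcp w.toList (ws.erase w) < e := by
  have hperm : ws.Perm (w :: ws.erase w) := List.perm_cons_erase hw
  rw [hperm.countP_eq, List.countP_cons]
  have hw1 : (decide (w.toList.take e <+: w.toList)) = true := by
    simp [List.take_prefix]
  rw [hw1, if_pos rfl]
  rw [maxLcp_lt_iff _ _ _ he1]
  constructor
  · intro h v hv
    have h0 : ((ws.erase w).countP (fun v => decide (w.toList.take e <+: v.toList))) = 0 := by omega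
    have h1 := List.countP_eq_zero.mp h0 v hv
    simp only [decide_eq_true_eq] at h1
    have h2 := (take_prefix_iff_lcpA w.toList v.toList e he2).not.mp h1
    omega
  · intro h
    have h0 : ((ws.erase w).countP (fun v => decide (w.toList.take e <+: v.toList))) = 0 := by
      apply List.countP_eq_zero.mpr
      intro v hv
      simp only [decide_eq_true_eq]
      rw [take_prefix_iff_lcpA w.toList v.toList e he2]
      have := h v hv
      omega
    omega

-- the prefix dictionary B builds, named for the proofs
def builtCnt (words : List String) : PySem.Dict String Int :=
  (words.flatMap (fun w =>
      (PySem.List.pyRange 1 ((w.toList.length : Int) + 1)).map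
        (fun d => PySem.Str.slice w none (some d)))).foldl
    (fun d p => d.insert p (d.getD p 0 + 1)) PySem.Dict.empty

theorem solution_alt_unfold (words : List String) :
    solution_alt words = words.foldl (fun tot w => tot + typedLoop (builtCnt words) w 1) 0 := rfl

theorem getD_builtCnt (words : List String) (p : String) (hp : p.toList ≠ []) :
    (builtCnt words).getD p 0 =
      ((words.countP (fun v => decide (p.toList <+: v.toList)) : Nat) : Int) := by
  unfold builtCnt
  rw [PySem.Dict.getD_foldl_insert_add_one]
  have hempty : (PySem.Dict.empty : PySem.Dict String Int).getD p 0 = 0 := rfl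
  rw [hempty, zero_add]
  congr 1
  rw [List.count_flatMap]
  have hmap : words.map (List.count p ∘ fun w =>
      (PySem.List.pyRange 1 ((w.toList.length : Int) + 1)).map
        (fun d => PySem.Str.slice w none (some d))) =
      words.map (fun v => if (decide (p.toList <+: v.toList)) then (1:Nat) else 0) := by
    apply List.map_congr_left
    intro v _
    simp only [Function.comp_apply]
    rw [pyRange_one_eq, List.map_map]
    have : ((fun d => PySem.Str.slice v none (some d)) ∘ fun k : Nat => ((k:Int)+1)) =
        (fun k : Nat => PySem.Str.slice v none (some ((k:Int)+1))) := rfl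
    rw [this, count_prefList p v hp]
    simp
  rw [hmap, sum_map_ite_one_zero_nat]

theorem typedLoop_eq (words : List String) (w : String) (hw : w ∈ words) (d : Nat)
    (hd1 : 1 ≤ d) (hd2 : d ≤ w.toList.length + 1) :
    typedLoop (builtCnt words) w d =
      ((min w.toList.length (max d (maxLcp w.toList (words.erase w) + 1)) : Nat) : Int) := by
  have hM : maxLcp w.toList (words.erase w) ≤ w.toList.length :=
    maxLcp_le _ (fun v _ => lcpA_le_left _ _)
  generalize hn : w.toList.length + 1 - d = n
  induction n generalizing d with
  | zero =>
    rw [typedLoop]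
    rw [if_neg (by omega)]
    have hd' : d = w.toList.length + 1 := by omega
    congr 1
    omega
  | succ n ih =>
    rw [typedLoop]
    rw [if_pos (by omega)]
    have hd : d ≤ w.toList.length := by omega
    have hp : (PySem.Str.slice w none (some (d : Int))).toList = w.toList.take d := toList_pfx w d
    have hne : (PySem.Str.slice w none (some (d : Int))).toList ≠ [] := by
      rw [hp]
      intro hcon
      have := congrArg List.length hcon
      simp only [List.length_take, List.length_nil] at this
      omega
    rw [getD_builtCnt words _ hne, hp]
    by_cases hlt : maxLcp w.toList (words.erase w) < d
    · rw [if_pos (by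
        rw [Nat.cast_eq_one]
        exact (countP_prefix_eq_one_iff words w hw d hd1 hd).mpr hlt)]
      congr 1
      omega
    · rw [if_neg (by
        rw [Nat.cast_eq_one]
        intro hcon
        exact hlt ((countP_prefix_eq_one_iff words w hw d hd1 hd).mp hcon))]
      rw [ih (d+1) (by omega) (by omega) (by omega)]
      congr 1
      omega

theorem solution_alt_eq (words : List String) :
    solution_alt words = (words.map (fun w => charge w words)).sum := by
  rw [solution_alt_unfold, PySem.List.foldl_add, zero_add]
  congr 1
  apply List.map_congr_left
  intro w hw
  rw [typedLoop_eq words w hw 1 (by omega) (by omega)]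
  unfold charge
  have : max 1 (maxLcp w.toList (words.erase w) + 1) = maxLcp w.toList (words.erase w) + 1 := by omega
  rw [this]

-- ---- A-side characterisation ----

theorem map_range_pyGetD {β : Type} (l : List String) (g : String → β) (dflt : String) :
    (List.range l.length).map (fun i : Nat => g (PySem.List.pyGetD l (i:Int) dflt)) = l.map g := by
  apply List.ext_getElem
  · simp
  · intro i h1 h2
    simp only [List.getElem_map, List.getElem_range]
    rw [PySem.List.pyGetD_eq_getElem l dflt (by omega) (by simp; simp at h2; omega)]
    simp

theorem solution_eq_sum (words : List String) :
    solution words = (words.map (fun w => charge w words)).sum := by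
  unfold solution
  simp only []
  set sw := PySem.List.sorted words (fun x => x) false with hsw
  have hperm : sw.Perm words := PySem.List.sorted_perm words (fun x => x) false
  rw [PySem.List.pyRange_zero_natCast, List.foldl_map,
    PySem.List.foldl_append_singleton_eq_map]
  rw [List.nil_append]
  have hstep : ∀ i ∈ List.range sw.length,
      (fun k : Nat =>
        let wi := (PySem.List.pyGetD sw (k:Int) "").toList
        let cnt1 : Nat := if 0 ≤ (k:Int) - 1 then lcpA wi (PySem.List.pyGetD sw ((k:Int) - 1) "").toList else 0
        let cnt2 : Nat := if (k:Int) + 1 < (sw.length:Int) then lcpA wi (PySem.List.pyGetD sw ((k:Int) + 1) "").toList else 0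
        let cnt := max cnt1 cnt2
        if cnt = wi.length then (cnt : Int) else (cnt : Int) + 1) i
      = charge (PySem.List.pyGetD sw (i:Int) "") words := by
    intro i hi
    have hi' : i < sw.length := List.mem_range.mp hi
    simp only []
    have hget : PySem.List.pyGetD sw (i:Int) "" = sw[i] := by
      rw [PySem.List.pyGetD_eq_getElem sw "" (by omega) (by omega)]
      simp
    have hc1 : (if 0 ≤ (i:Int) - 1 then lcpA (PySem.List.pyGetD sw (i:Int) "").toList (PySem.List.pyGetD sw ((i:Int) - 1) "").toList else 0)
        = (if h : 1 ≤ i then lcpA sw[i].toList (sw[i-1]'(by omega)).toList else 0) := by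
      by_cases h : 1 ≤ i
      · rw [if_pos (by omega), dif_pos h, hget]
        have : (i:Int) - 1 = ((i-1 : Nat) : Int) := by omega
        rw [this, PySem.List.pyGetD_eq_getElem sw "" (by omega) (by omega)]
        simp
      · rw [if_neg (by omega), dif_neg h]
    have hc2 : (if (i:Int) + 1 < (sw.length:Int) then lcpA (PySem.List.pyGetD sw (i:Int) "").toList (PySem.List.pyGetD sw ((i:Int) + 1) "").toList else 0)
        = (if h : i + 1 < sw.length then lcpA sw[i].toList (sw[i+1]'h).toList else 0) := by
      by_cases h : i + 1 < sw.length
      · rw [if_pos (by omega), dif_pos h, hget]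
        have : (i:Int) + 1 = ((i+1 : Nat) : Int) := by omega
        rw [this, PySem.List.pyGetD_eq_getElem sw "" (by omega) (by omega)]
        simp
      · rw [if_neg (by omega), dif_neg h]
    rw [hc1, hc2, hget]
    have hsorted : List.Pairwise (· ≤ ·) sw := PySem.List.sorted_pairwise words (fun x => x)
    rw [← maxLcp_eraseIdx_sorted sw hsorted i hi']
    rw [← maxLcp_perm sw[i].toList (erase_perm_eraseIdx sw i hi')]
    set M := maxLcp sw[i].toList (sw.erase sw[i]) with hM
    have hMle : M ≤ sw[i].toList.length :=
      maxLcp_le _ (fun v hv => lcpA_le_left _ _)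
    have hch : charge sw[i] words = ((min sw[i].toList.length (M + 1) : Nat) : Int) := by
      rw [← charge_perm sw[i] hperm]
      rfl
    rw [hch]
    by_cases hEq : M = sw[i].toList.length
    · rw [if_pos hEq]
      congr 1
      omega
    · rw [if_neg hEq]
      push_cast
      omega
  rw [List.map_congr_left hstep]
  rw [map_range_pyGetD sw (fun w => charge w words) ""]
  exact (List.Perm.map (fun w => charge w words) hperm).sum_eq

-- ===== VERDICT (by name: the statement is the Claim_ definition above) =====
theorem solution_spec : Claim_equal_solution := by
  intro words _
  show solution words = solution_alt words
  rw [solution_eq_sum, solution_alt_eq]
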